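-- pv_equiv track=rewrite | github.com/lucasbagge/seges | _build/jupyter_execute/pythonintro/recursion.py | bitonic_min_rec
-- ===== SOURCE A (Python) =====
-- def bitonic_min_rec(L):
--     mid = len(L) // 2
--     if len(L) == 1:
--         return L[0]
--     if L[mid] > L[mid - 1]:
--         return bitonic_min_rec(L[:mid])
--     else:
--         return bitonic_min_rec(L[mid:])
-- ===== SOURCE B (Python) =====
-- def bitonic_min_rec(L):
--     lo, hi = 0, len(L)
--     while hi - lo > 1:
--         m = lo + (hi - lo) // 2
--         if L[m] > L[m - 1]:
--             hi = m
--         else: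
--             lo = m
--     return L[lo]
-- ===== Notes on version B (the rewrite author's own statement) =====
-- stated objective: alternative
-- what changed: Replaced the slicing recursion by an iterative binary search maintaining index bounds (lo, hi) into the original list, so no slice copies are made.
import Mathlib
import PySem

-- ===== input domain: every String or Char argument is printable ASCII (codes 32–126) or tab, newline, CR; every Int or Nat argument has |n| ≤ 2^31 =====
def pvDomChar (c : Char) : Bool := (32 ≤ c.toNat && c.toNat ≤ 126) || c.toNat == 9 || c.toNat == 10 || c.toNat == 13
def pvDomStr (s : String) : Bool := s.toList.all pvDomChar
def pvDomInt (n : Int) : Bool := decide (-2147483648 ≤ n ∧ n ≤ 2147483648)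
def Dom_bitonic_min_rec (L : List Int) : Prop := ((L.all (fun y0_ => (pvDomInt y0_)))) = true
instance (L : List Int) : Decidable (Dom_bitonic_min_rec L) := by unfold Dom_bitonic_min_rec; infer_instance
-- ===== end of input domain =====

-- B replaces A's slicing recursion by an iterative binary search maintaining index bounds (lo, hi), copying no lists.


-- ===== PORT A =====
-- literal port of A: mid = len(L)//2; compare L[mid] > L[mid-1]; recurse on slice L[:mid] or L[mid:].
-- pyGet? = none is exactly where Python raises IndexError (only the empty list reaches it); 0 there is junk outside Pre_.
def bitonic_min_rec (L : List Int) : Int :=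
  let mid : Nat := L.length / 2
  if L.length = 1 then (PySem.List.pyGet? L 0).getD 0
  else
    match h2 : PySem.List.pyGet? L (mid : Int), PySem.List.pyGet? L ((mid : Int) - 1) with
    | some a, some b =>
      if a > b then bitonic_min_rec (PySem.List.slice L none (some (mid : Int)))
      else bitonic_min_rec (PySem.List.slice L (some (mid : Int)) none)
    | _, _ => 0
termination_by L.length
decreasing_by
  all_goals
    rename_i h1 _
    have hm : (mid : Int) < L.length := by
      have hn := PySem.List.pyGet?_eq_none_iff (xs := L) (i := (mid : Int))
      rcases lt_or_ge (mid : Int) (L.length : Int) with h3 | h3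
      · exact h3
      · exfalso
        have : PySem.List.pyGet? L (mid : Int) = none :=
          hn.mpr (by simp [PySem.Raise.InRange]; omega)
        simp [this] at h2
  · rw [PySem.List.slice_to_natCast]; simp [mid] at *; omega
  · rw [PySem.List.slice_from_natCast]; simp [mid] at *; omega

-- ===== PORT B =====
-- the while-loop of Source B: state (lo, hi), half-open window; its indices are always in range while it runs.
def bitonicLoop (L : List Int) (lo hi : Nat) : Nat :=
  if hi - lo > 1 then
    let m := lo + (hi - lo) / 2
    if PySem.List.pyGetD L (m : Int) 0 > PySem.List.pyGetD L ((m : Int) - 1) 0 then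
      bitonicLoop L lo m
    else
      bitonicLoop L m hi
  else lo
termination_by hi - lo
decreasing_by
  · rename_i h _; omega
  · rename_i h _; omega

def bitonic_min_rec_alt (L : List Int) : Int :=
  (PySem.List.pyGet? L ((bitonicLoop L 0 L.length : Nat) : Int)).getD 0

-- ===== PRECONDITION & SPEC =====
-- A raises IndexError on the empty list (L[mid] with mid = 0); B raises there too (L[lo]); nothing else is excluded.
def Pre_bitonic_min_rec (L : List Int) : Prop := L ≠ []
instance (L : List Int) : Decidable (Pre_bitonic_min_rec L) := by unfold Pre_bitonic_min_rec; infer_instance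

def pvWitness_bitonic_min_rec : List Int := [3, 5, 4, 1, 2]

def Spec_bitonic_min_rec (L : List Int) (out : Int) : Prop := out = bitonic_min_rec_alt L
instance (L : List Int) (out : Int) : Decidable (Spec_bitonic_min_rec L out) := by unfold Spec_bitonic_min_rec; infer_instance

-- ===== CLAIM (what is proved, stated in full; the proofs are below) =====
def Claim_equal_bitonic_min_rec : Prop := ∀ (L : List Int), Dom_bitonic_min_rec L → Pre_bitonic_min_rec L → Spec_bitonic_min_rec L (bitonic_min_rec L)

-- ===== LEMMAS AND PROOFS =====

lemma bitonicLoop_step (L : List Int) (lo hi : Nat) (h : hi - lo > 1) :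
    bitonicLoop L lo hi =
      if PySem.List.pyGetD L ((lo + (hi - lo) / 2 : Nat) : Int) 0 >
          PySem.List.pyGetD L (((lo + (hi - lo) / 2 : Nat) : Int) - 1) 0 then
        bitonicLoop L lo (lo + (hi - lo) / 2)
      else bitonicLoop L (lo + (hi - lo) / 2) hi := by
  rw [bitonicLoop]
  simp [h]

-- Invariant: A run on the window L[lo:hi] returns the element of L that B's loop finds the index of.
lemma bitonic_window (n : Nat) :
    ∀ (L : List Int) (lo hi : Nat), hi - lo = n → lo < hi → hi ≤ L.length →
      bitonic_min_rec ((L.drop lo).take (hi - lo)) =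
        (PySem.List.pyGet? L ((bitonicLoop L lo hi : Nat) : Int)).getD 0 := by
  induction n using Nat.strong_induction_on with
  | _ n ih =>
    intro L lo hi hn hlt hle
    have hW : ((L.drop lo).take (hi - lo)).length = hi - lo := by
      simp; omega
    by_cases h1 : hi - lo = 1
    · have hx : lo < L.length := by omega
      have hwin : (L.drop lo).take (hi - lo) = [L[lo]'hx] := by
        rw [h1]
        exact List.take_one_drop_eq_of_lt_length hx
      rw [hwin, bitonic_min_rec, bitonicLoop]
      rw [if_neg (by omega : ¬ (hi - lo > 1))]
      simp [PySem.List.pyGet?_natCast,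
        List.getElem?_eq_getElem hx]
    · have h2 : 2 ≤ hi - lo := by omega
      have hmid1 : 1 ≤ (hi - lo) / 2 := by omega
      have hmid2 : (hi - lo) / 2 < hi - lo := by omega
      have hg1 : PySem.List.pyGet? ((L.drop lo).take (hi - lo)) ((((L.drop lo).take (hi - lo)).length / 2 : Nat) : Int)
          = some (L[lo + (hi - lo) / 2]'(by omega)) := by
        rw [PySem.List.pyGet?_natCast, hW]
        rw [List.getElem?_take_of_lt hmid2, List.getElem?_drop]
        exact List.getElem?_eq_getElem (by omega)
      have hg2 : PySem.List.pyGet? ((L.drop lo).take (hi - lo)) (((((L.drop lo).take (hi - lo)).length / 2 : Nat) : Int) - 1)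
          = some (L[lo + (hi - lo) / 2 - 1]'(by omega)) := by
        have he : ((((L.drop lo).take (hi - lo)).length / 2 : Nat) : Int) - 1 = (((hi - lo) / 2 - 1 : Nat) : Int) := by
          rw [hW]; push_cast [hmid1]; omega
        rw [he, PySem.List.pyGet?_natCast]
        rw [List.getElem?_take_of_lt (by omega), List.getElem?_drop]
        have he2 : lo + ((hi - lo) / 2 - 1) = lo + (hi - lo) / 2 - 1 := by omega
        rw [he2]
        exact List.getElem?_eq_getElem (by omega)
      have hd1 : PySem.List.pyGetD L ((lo + (hi - lo) / 2 : Nat) : Int) 0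
          = L[lo + (hi - lo) / 2]'(by omega) := by
        rw [PySem.List.pyGetD_natCast]
        exact List.getD_eq_getElem _ _ (by omega)
      have hd2 : PySem.List.pyGetD L (((lo + (hi - lo) / 2 : Nat) : Int) - 1) 0
          = L[lo + (hi - lo) / 2 - 1]'(by omega) := by
        have he : ((lo + (hi - lo) / 2 : Nat) : Int) - 1 = ((lo + (hi - lo) / 2 - 1 : Nat) : Int) := by
          push_cast; omega
        rw [he, PySem.List.pyGetD_natCast]
        exact List.getD_eq_getElem _ _ (by omega)
      rw [bitonic_min_rec, bitonicLoop_step L lo hi (by omega), hd1, hd2]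
      rw [if_neg (show ¬ ((L.drop lo).take (hi - lo)).length = 1 by omega)]
      split
      · rename_i a b heq1 heq2
        rw [hg1] at heq1
        rw [hg2] at heq2
        cases heq1; cases heq2
        split_ifs with hcmp <;> simp only [hW]
        · -- hi := lo + mid
          rw [PySem.List.slice_to_natCast, List.take_take]
          have hmin : min ((hi - lo) / 2) (hi - lo) = (lo + (hi - lo) / 2) - lo := by omega
          rw [hmin]
          exact ih ((hi - lo) / 2) (by omega) L lo (lo + (hi - lo) / 2) (by omega) (by omega) (by omega)
        · -- lo := lo + mid
          rw [PySem.List.slice_from_natCast, List.drop_take, List.drop_drop]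
          have e2 : hi - lo - (hi - lo) / 2 = hi - (lo + (hi - lo) / 2) := by omega
          rw [e2]
          exact ih (hi - (lo + (hi - lo) / 2)) (by omega) L (lo + (hi - lo) / 2) hi (by omega) (by omega) (by omega)
      · rename_i hbad
        exact absurd (hbad _ _ hg1 hg2) (fun h => h)


theorem bitonic_min_rec_spec : Claim_equal_bitonic_min_rec := by
  intro L _ hpre
  have hlen : 0 < L.length := List.length_pos_iff.mpr hpre
  have h := bitonic_window L.length L 0 L.length (by omega) hlen (le_refl _)
  unfold Spec_bitonic_min_rec bitonic_min_rec_alt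
  simpa using h
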